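-- pv_equiv track=rewrite | github.com/jose-raul-barreras/adventofcode | 2024/src/d08_resonant_collinearity.py | get_harmonic_antinodes
-- ===== SOURCE A (Python) =====
-- import itertools
-- import math
--
-- def remove_out_of_bounds(lst, grid_size):
--     """
--     Remove out-of-bounds antinodes and duplicates.
--
--     Args:
--         lst: List of antinode points
--         grid_size: Tuple representing the grid size (width, height)
--
--     Returns:
--         Sorted list of valid antinode points
--     """
--     return sorted({element for element in lst if 0 <= element[0] < grid_size[0] and 0 <= element[1] < grid_size[1]})
--
-- def harmonic_antinodes(p1, p2, grid_size):
--     """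
--     Calculate harmonic antinodes for given points p1 and p2.
--     Returns all the points in the line defined by p1 and p2 such that all the points are within the grid
--     The distance between the points pn and pn+1 is the same as the distance between p1 and p2
--
--     Args:
--         p1: Tuple representing the first point (x1, y1)
--         p2: Tuple representing the second point (x2, y2)
--         grid_size: Tuple representing the grid size (width, height)
--
--     Returns:
--         List of valid harmonic antinode points
--     """
--     points = []
--     dx = p2[0] - p1[0]
--     dy = p2[1] - p1[1]
--     gcd = abs(dx) if dy == 0 else abs(dy) if dx == 0 else abs(math.gcd(dx, dy))
--     step_x = dx // gcd
--     step_y = dy // gcd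
--
--     for i in range(-grid_size[0], grid_size[0]):
--         x = p1[0] + i * step_x
--         y = p1[1] + i * step_y
--         if 0 <= x < grid_size[0] and 0 <= y < grid_size[1]:
--             points.append((x, y))
--
--     return points
--
-- def get_antinodes_for_frequency(grid, grid_size, frequency):
--     """
--     Calculate the antinodes for a given frequency in a grid.
--     This function takes a grid of antennas, the size of the grid, and a specific frequency,
--     and returns a list of antinodes for that frequency. Antinodes are calculated based on
--     pairs of antennas that resonate at the given frequency.
--
--         Args:
--         grid (dict): A dictionary where keys are frequencies and values are lists of antenna positions.
--         grid_size (int): The size of the grid.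
--         frequency (int): The frequency for which to calculate antinodes.
--
--             Returns:
--         list: A list of antinode positions for the given frequency, with positions out of bounds removed.
--
--     """
--     antinodes_list = []
--     antennas_pairs = list(itertools.combinations(grid[frequency], 2))
--     for antennas in antennas_pairs:
--         p1 = min(antennas)
--         p2 = max(antennas)
--         antinodes_list = antinodes_list + harmonic_antinodes(p1, p2, grid_size)
--
--     return remove_out_of_bounds(antinodes_list, grid_size)
--
-- def get_harmonic_antinodes(grid, grid_size):
--     """
--     Identifies and returns the harmonic antinodes from a given grid.
--     This function processes a grid to find harmonic antinodes, which are points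
--     where the amplitude of a wave is at a maximum. It skips grid keys that are
--     either '.' or '#', and only considers keys with more than one element. The
--     function then collects antinodes for each frequency and ensures they are
--     within the grid bounds.
--
--     Args:
--         grid (dict): A dictionary representing the grid where keys are
--                      frequencies and values are lists of coordinates.
--         grid_size (tuple): A tuple representing the size of the grid (rows, columns).
--
--     Returns:
--         set: A set of coordinates representing the harmonic antinodes within the grid bounds.
--
--     """
--     antinodes_list = set()
--     for key in grid.keys():
--         if key in [".", "#"]:
--             continue
--         if len(grid[key]) > 1:
--             antinodes_list_key = set(grid[key])
--             antinodes_list_key = antinodes_list.union(get_antinodes_for_frequency(grid, grid_size, key))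
--             antinodes_list = antinodes_list.union(antinodes_list_key)
--
--     res = remove_out_of_bounds(antinodes_list, grid_size)
--     return res
-- ===== SOURCE B (Python) =====
-- import itertools
-- import math
--
-- def _axis(c, s, bound, lo, hi):
--     """Intersect the integer interval [lo, hi] with { i : 0 <= c + i*s < bound }."""
--     if s == 0:
--         return (lo, hi) if 0 <= c < bound else (lo, lo - 1)
--     if s > 0:
--         return max(lo, -(c // s)), min(hi, (bound - 1 - c) // s)
--     return max(lo, -((bound - 1 - c) // (-s))), min(hi, c // (-s))
--
-- def get_harmonic_antinodes(grid, grid_size):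
--     W, H = grid_size
--     pts = set()
--     for key, antennas in grid.items():
--         if key in (".", "#") or len(antennas) <= 1:
--             continue
--         for a, b in itertools.combinations(antennas, 2):
--             p1, p2 = (b, a) if b < a else (a, b)
--             dx = p2[0] - p1[0]
--             dy = p2[1] - p1[1]
--             g = math.gcd(dx, dy)
--             sx = dx // g
--             sy = dy // g
--             lo, hi = _axis(p1[0], sx, W, -W, W - 1)
--             lo, hi = _axis(p1[1], sy, H, lo, hi)
--             for i in range(lo, hi + 1):
--                 pts.add((p1[0] + i * sx, p1[1] + i * sy))
--     return sorted(pts)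
-- ===== Notes on version B (the rewrite author's own statement) =====
-- stated objective: faster
-- what changed: B computes, for each antenna pair, the exact in-bounds index interval by closed-form floor divisions instead of scanning all i in [-W, W) with a bounds test, and accumulates every point into one set that is sorted once, instead of A's repeated list concatenation and per-frequency sort/dedup/union rounds.
import Mathlib
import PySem

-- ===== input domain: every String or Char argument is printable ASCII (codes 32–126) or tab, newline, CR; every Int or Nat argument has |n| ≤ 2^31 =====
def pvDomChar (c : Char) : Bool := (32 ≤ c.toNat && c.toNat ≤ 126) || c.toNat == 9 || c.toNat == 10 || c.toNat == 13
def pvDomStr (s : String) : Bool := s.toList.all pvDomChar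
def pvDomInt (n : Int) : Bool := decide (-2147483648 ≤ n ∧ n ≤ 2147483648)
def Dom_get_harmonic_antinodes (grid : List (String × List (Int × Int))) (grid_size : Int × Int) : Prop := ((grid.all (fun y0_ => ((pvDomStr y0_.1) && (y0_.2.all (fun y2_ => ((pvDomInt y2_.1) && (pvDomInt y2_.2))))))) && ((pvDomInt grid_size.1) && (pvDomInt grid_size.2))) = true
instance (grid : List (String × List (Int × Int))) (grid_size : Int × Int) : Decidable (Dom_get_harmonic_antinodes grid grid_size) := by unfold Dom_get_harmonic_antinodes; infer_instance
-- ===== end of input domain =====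

-- B replaces A's full-width scan per antenna pair and repeated list concatenation by a
-- directly computed in-bounds index interval and a single set accumulated once and sorted once.

-- ===== PORT A =====

-- Python tuple comparison a < b on pairs of ints (lexicographic)
def pvLexLt (a b : Int × Int) : Bool := decide (a.1 < b.1) || (decide (a.1 = b.1) && decide (a.2 < b.2))

-- itertools.combinations(xs, 2), in order
def pvCombos : List (Int × Int) → List ((Int × Int) × (Int × Int))
  | [] => []
  | x :: t => t.map (fun y => (x, y)) ++ pvCombos t

-- 0 <= element[0] < grid_size[0] and 0 <= element[1] < grid_size[1]
def pvInb (gs : Int × Int) (e : Int × Int) : Bool :=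
  decide (0 ≤ e.1) && decide (e.1 < gs.1) && decide (0 ≤ e.2) && decide (e.2 < gs.2)

def remove_out_of_bounds (lst : List (Int × Int)) (gs : Int × Int) : List (Int × Int) :=
  PySem.List.sorted2 (PySem.Set.ofList (lst.filter (pvInb gs))) (fun e => e.1) (fun e => e.2)

def harmonic_antinodes (p1 p2 gs : Int × Int) : List (Int × Int) :=
  let dx := p2.1 - p1.1
  let dy := p2.2 - p1.2
  let gcd : Int := if dy = 0 then (dx.natAbs : Int) else if dx = 0 then (dy.natAbs : Int) else ((Int.gcd dx dy : Nat) : Int)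
  let step_x := PySem.Int.floordiv dx gcd
  let step_y := PySem.Int.floordiv dy gcd
  (PySem.List.pyRange (-gs.1) gs.1 1).foldl (fun points i =>
    let x := p1.1 + i * step_x
    let y := p1.2 + i * step_y
    if 0 ≤ x ∧ x < gs.1 ∧ 0 ≤ y ∧ y < gs.2 then points ++ [(x, y)] else points) []

def get_antinodes_for_frequency (d : PySem.Dict String (List (Int × Int))) (gs : Int × Int) (frequency : String) : List (Int × Int) :=
  let antennas_pairs := pvCombos (d.getD frequency [])
  let antinodes_list := antennas_pairs.foldl (fun acc ab =>
    let p1 := if pvLexLt ab.2 ab.1 then ab.2 else ab.1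
    let p2 := if pvLexLt ab.1 ab.2 then ab.2 else ab.1
    acc ++ harmonic_antinodes p1 p2 gs) []
  remove_out_of_bounds antinodes_list gs

def get_harmonic_antinodes (grid : List (String × List (Int × Int))) (grid_size : Int × Int) : List (Int × Int) :=
  let d : PySem.Dict String (List (Int × Int)) := PySem.Dict.ofList grid
  let antinodes_list := d.keys.foldl (fun s key =>
    if key = "." ∨ key = "#" then s
    else if 1 < (d.getD key []).length then
      let _antinodes_list_key := PySem.Set.ofList (d.getD key [])
      let antinodes_list_key := PySem.Set.union s (get_antinodes_for_frequency d grid_size key)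
      PySem.Set.union s antinodes_list_key
    else s) PySem.Set.empty
  remove_out_of_bounds antinodes_list grid_size

-- ===== PORT B =====

-- intersect [lo, hi] with { i : 0 <= c + i*s < bound }
def pvAxis (c s bound lo hi : Int) : Int × Int :=
  if s = 0 then (if 0 ≤ c ∧ c < bound then (lo, hi) else (lo, lo - 1))
  else if 0 < s then (max lo (-(PySem.Int.floordiv c s)), min hi (PySem.Int.floordiv (bound - 1 - c) s))
  else (max lo (-(PySem.Int.floordiv (bound - 1 - c) (-s))), min hi (PySem.Int.floordiv c (-s)))

def get_harmonic_antinodes_alt (grid : List (String × List (Int × Int))) (grid_size : Int × Int) : List (Int × Int) :=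
  let d : PySem.Dict String (List (Int × Int)) := PySem.Dict.ofList grid
  let pts := d.items.foldl (fun pts kv =>
    if kv.1 = "." ∨ kv.1 = "#" ∨ kv.2.length ≤ 1 then pts
    else (pvCombos kv.2).foldl (fun pts ab =>
      let p1 := if pvLexLt ab.2 ab.1 then ab.2 else ab.1
      let p2 := if pvLexLt ab.2 ab.1 then ab.1 else ab.2
      let dx := p2.1 - p1.1
      let dy := p2.2 - p1.2
      let g : Int := ((Int.gcd dx dy : Nat) : Int)
      let sx := PySem.Int.floordiv dx g
      let sy := PySem.Int.floordiv dy g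
      let lh1 := pvAxis p1.1 sx grid_size.1 (-grid_size.1) (grid_size.1 - 1)
      let lh2 := pvAxis p1.2 sy grid_size.2 lh1.1 lh1.2
      (PySem.List.pyRange lh2.1 (lh2.2 + 1) 1).foldl (fun pts i =>
        PySem.Set.add pts (p1.1 + i * sx, p1.2 + i * sy)) pts) pts) PySem.Set.empty
  PySem.List.sorted2 pts (fun e => e.1) (fun e => e.2)

-- ===== PRECONDITION & SPEC =====
-- Pre_ excludes exactly the inputs where Python A raises ZeroDivisionError: a frequency
-- (other than '.' and '#') whose antenna list contains a duplicate point makes A divide by gcd = 0.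
def Pre_get_harmonic_antinodes (grid : List (String × List (Int × Int))) (grid_size : Int × Int) : Prop :=
  ∀ kv ∈ (PySem.Dict.ofList grid : PySem.Dict String (List (Int × Int))).items,
    (kv.1 ≠ "." ∧ kv.1 ≠ "#") → kv.2.Nodup

instance (grid : List (String × List (Int × Int))) (grid_size : Int × Int) : Decidable (Pre_get_harmonic_antinodes grid grid_size) := by unfold Pre_get_harmonic_antinodes; infer_instance

def pvWitness_get_harmonic_antinodes : (List (String × List (Int × Int))) × (Int × Int) :=
  ([("a", [(0, 0), (1, 1)])], (4, 4))

def Spec_get_harmonic_antinodes (grid : List (String × List (Int × Int))) (grid_size : Int × Int) (out : List (Int × Int)) : Prop := out = get_harmonic_antinodes_alt grid grid_size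
instance (grid : List (String × List (Int × Int))) (grid_size : Int × Int) (out : List (Int × Int)) : Decidable (Spec_get_harmonic_antinodes grid grid_size out) := by unfold Spec_get_harmonic_antinodes; infer_instance

-- ===== CLAIM (what is proved, stated in full; the proofs are below) =====
def Claim_equal_get_harmonic_antinodes : Prop := ∀ (grid : List (String × List (Int × Int))) (grid_size : Int × Int), Dom_get_harmonic_antinodes grid grid_size → Pre_get_harmonic_antinodes grid grid_size → Spec_get_harmonic_antinodes grid grid_size (get_harmonic_antinodes grid grid_size)

-- ===== LEMMAS AND PROOFS =====

theorem pv_mem_foldl_iff {β γ : Type} (step : List γ → β → List γ) (P : β → γ → Prop)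
    (h : ∀ s b q, q ∈ step s b ↔ q ∈ s ∨ P b q) :
    ∀ (l : List β) (s : List γ) (q : γ), q ∈ l.foldl step s ↔ q ∈ s ∨ ∃ b ∈ l, P b q := by
  intro l
  induction l with
  | nil => simp
  | cons x t ih =>
    intro s q
    simp only [List.foldl_cons, ih, h, List.mem_cons]
    constructor
    · rintro ((hq | hp) | ⟨b, hb, hp⟩)
      · exact Or.inl hq
      · exact Or.inr ⟨x, Or.inl rfl, hp⟩
      · exact Or.inr ⟨b, Or.inr hb, hp⟩
    · rintro (hq | ⟨b, (rfl | hb), hp⟩)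
      · exact Or.inl (Or.inl hq)
      · exact Or.inl (Or.inr hp)
      · exact Or.inr ⟨b, hb, hp⟩

theorem pv_nodup_foldl {β γ : Type} (step : List γ → β → List γ)
    (h : ∀ s b, s.Nodup → (step s b).Nodup) :
    ∀ (l : List β) (s : List γ), s.Nodup → (l.foldl step s).Nodup := by
  intro l
  induction l with
  | nil => intro s hs; simpa using hs
  | cons x t ih => intro s hs; exact ih _ (h s x hs)

-- the interval computed by pvAxis is exactly the clipped in-bounds index set
theorem pv_axis_mem (c s bound lo hi i : Int) :
    ((pvAxis c s bound lo hi).1 ≤ i ∧ i ≤ (pvAxis c s bound lo hi).2) ↔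
      (lo ≤ i ∧ i ≤ hi ∧ 0 ≤ c + i * s ∧ c + i * s < bound) := by
  unfold pvAxis
  split_ifs with h0 hc hp
  · simp only [h0, mul_zero, add_zero]
    constructor
    · rintro ⟨h1, h2⟩; exact ⟨h1, h2, hc.1, hc.2⟩
    · rintro ⟨h1, h2, _, _⟩; exact ⟨h1, h2⟩
  · simp only [h0, mul_zero, add_zero]
    constructor
    · rintro ⟨h1, h2⟩; omega
    · rintro ⟨h1, h2, h3, h4⟩; exact absurd ⟨h3, h4⟩ hc
  · -- s > 0
    have e1 : (-i ≤ PySem.Int.floordiv c s) ↔ (-i) * s ≤ c := PySem.Int.le_floordiv_iff_mul_le hp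
    have e2 : (i ≤ PySem.Int.floordiv (bound - 1 - c) s) ↔ i * s ≤ bound - 1 - c :=
      PySem.Int.le_floordiv_iff_mul_le hp
    simp only [max_le_iff, le_min_iff, neg_le]
    rw [e1, e2]
    constructor
    · rintro ⟨⟨h1, h2⟩, h3, h4⟩
      refine ⟨h1, h3, ?_, ?_⟩ <;> nlinarith
    · rintro ⟨h1, h2, h3, h4⟩
      refine ⟨⟨h1, ?_⟩, h2, ?_⟩ <;> nlinarith
  · -- s < 0
    have hs : 0 < -s := by omega
    have e1 : (-i ≤ PySem.Int.floordiv (bound - 1 - c) (-s)) ↔ (-i) * (-s) ≤ bound - 1 - c :=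
      PySem.Int.le_floordiv_iff_mul_le hs
    have e2 : (i ≤ PySem.Int.floordiv c (-s)) ↔ i * (-s) ≤ c := PySem.Int.le_floordiv_iff_mul_le hs
    simp only [max_le_iff, le_min_iff, neg_le]
    rw [e1, e2]
    constructor
    · rintro ⟨⟨h1, h2⟩, h3, h4⟩
      refine ⟨h1, h3, ?_, ?_⟩ <;> nlinarith
    · rintro ⟨h1, h2, h3, h4⟩
      refine ⟨⟨h1, ?_⟩, h2, ?_⟩ <;> nlinarith

-- min/max of a two-element tuple, as the ports compute them
def pvMin (a b : Int × Int) : Int × Int := if pvLexLt b a then b else a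
def pvMax (a b : Int × Int) : Int × Int := if pvLexLt a b then b else a

theorem pv_p2_eq (a b : Int × Int) : (if pvLexLt b a then a else b) = pvMax a b := by
  unfold pvMax pvLexLt
  rcases a with ⟨a1, a2⟩; rcases b with ⟨b1, b2⟩
  simp only [Bool.or_eq_true, Bool.and_eq_true, decide_eq_true_eq]
  split_ifs with h1 h2 h2
  · exfalso; rcases h1 with h | ⟨h, h'⟩ <;> rcases h2 with g | ⟨g, g'⟩ <;> omega
  · rfl
  · rfl
  · have : a1 = b1 ∧ a2 = b2 := by constructor <;> omega
    simp [this.1, this.2]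

theorem pv_gcd_chain (dx dy : Int) :
    (if dy = 0 then (dx.natAbs : Int) else if dx = 0 then (dy.natAbs : Int) else ((Int.gcd dx dy : Nat) : Int))
      = ((Int.gcd dx dy : Nat) : Int) := by
  split_ifs with h1 h2
  · simp [h1, Int.gcd]
  · simp [h2, Int.gcd]
  · rfl

-- the canonical description of the points one antenna pair contributes
def pvStepOf (p1 p2 : Int × Int) : Int × Int :=
  (PySem.Int.floordiv (p2.1 - p1.1) ((Int.gcd (p2.1 - p1.1) (p2.2 - p1.2) : Nat) : Int),
   PySem.Int.floordiv (p2.2 - p1.2) ((Int.gcd (p2.1 - p1.1) (p2.2 - p1.2) : Nat) : Int))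

def pvPairP (gs : Int × Int) (ab : (Int × Int) × (Int × Int)) (q : Int × Int) : Prop :=
  ∃ i : Int, -gs.1 ≤ i ∧ i < gs.1 ∧
    0 ≤ (pvMin ab.1 ab.2).1 + i * (pvStepOf (pvMin ab.1 ab.2) (pvMax ab.1 ab.2)).1 ∧
    (pvMin ab.1 ab.2).1 + i * (pvStepOf (pvMin ab.1 ab.2) (pvMax ab.1 ab.2)).1 < gs.1 ∧
    0 ≤ (pvMin ab.1 ab.2).2 + i * (pvStepOf (pvMin ab.1 ab.2) (pvMax ab.1 ab.2)).2 ∧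
    (pvMin ab.1 ab.2).2 + i * (pvStepOf (pvMin ab.1 ab.2) (pvMax ab.1 ab.2)).2 < gs.2 ∧
    q = ((pvMin ab.1 ab.2).1 + i * (pvStepOf (pvMin ab.1 ab.2) (pvMax ab.1 ab.2)).1,
         (pvMin ab.1 ab.2).2 + i * (pvStepOf (pvMin ab.1 ab.2) (pvMax ab.1 ab.2)).2)

-- the common mathematical description of both programs' point sets
def pvE (grid : List (String × List (Int × Int))) (gs : Int × Int) (q : Int × Int) : Prop :=
  ∃ key ∈ (PySem.Dict.ofList grid : PySem.Dict String (List (Int × Int))).keys,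
    ¬(key = "." ∨ key = "#") ∧
    1 < ((PySem.Dict.ofList grid : PySem.Dict String (List (Int × Int))).getD key []).length ∧
    ∃ ab ∈ pvCombos ((PySem.Dict.ofList grid : PySem.Dict String (List (Int × Int))).getD key []),
      pvPairP gs ab q

theorem pv_mem_harmonic (p1 p2 gs : Int × Int) (q : Int × Int) :
    q ∈ harmonic_antinodes p1 p2 gs ↔
      ∃ i : Int, -gs.1 ≤ i ∧ i < gs.1 ∧
        0 ≤ p1.1 + i * (pvStepOf p1 p2).1 ∧ p1.1 + i * (pvStepOf p1 p2).1 < gs.1 ∧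
        0 ≤ p1.2 + i * (pvStepOf p1 p2).2 ∧ p1.2 + i * (pvStepOf p1 p2).2 < gs.2 ∧
        q = (p1.1 + i * (pvStepOf p1 p2).1, p1.2 + i * (pvStepOf p1 p2).2) := by
  simp only [harmonic_antinodes]
  rw [pv_gcd_chain]
  rw [pv_mem_foldl_iff _ (fun i q =>
        (0 ≤ p1.1 + i * (pvStepOf p1 p2).1 ∧ p1.1 + i * (pvStepOf p1 p2).1 < gs.1 ∧
         0 ≤ p1.2 + i * (pvStepOf p1 p2).2 ∧ p1.2 + i * (pvStepOf p1 p2).2 < gs.2) ∧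
        q = (p1.1 + i * (pvStepOf p1 p2).1, p1.2 + i * (pvStepOf p1 p2).2))
      (by
        intro s b q
        dsimp only
        split_ifs with h
        · simp only [List.mem_append, List.mem_singleton]
          exact ⟨fun h' => h'.elim Or.inl (fun e => Or.inr ⟨h, e⟩),
                 fun h' => h'.elim Or.inl (fun e => Or.inr e.2)⟩
        · exact ⟨Or.inl, fun h' => h'.elim id (fun e => absurd e.1 h)⟩)]
  simp only [List.not_mem_nil, false_or, PySem.List.mem_pyRange_one]
  constructor
  · rintro ⟨i, ⟨hi1, hi2⟩, ⟨h1, h2, h3, h4⟩, he⟩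
    exact ⟨i, hi1, hi2, h1, h2, h3, h4, he⟩
  · rintro ⟨i, hi1, hi2, h1, h2, h3, h4, he⟩
    exact ⟨i, ⟨hi1, hi2⟩, ⟨h1, h2, h3, h4⟩, he⟩

-- A'S SIDE ------------------------------------------------------------

theorem pv_mem_rob (lst : List (Int × Int)) (gs : Int × Int) (q : Int × Int) :
    q ∈ remove_out_of_bounds lst gs ↔ pvInb gs q = true ∧ q ∈ lst := by
  unfold remove_out_of_bounds
  rw [(PySem.List.sorted2_perm _ _ _ _).mem_iff, PySem.Set.mem_ofList, List.mem_filter]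
  tauto

theorem pv_mem_freq (d : PySem.Dict String (List (Int × Int))) (gs : Int × Int) (key : String) (q : Int × Int) :
    q ∈ get_antinodes_for_frequency d gs key ↔
      pvInb gs q = true ∧ ∃ ab ∈ pvCombos (d.getD key []), pvPairP gs ab q := by
  simp only [get_antinodes_for_frequency]
  rw [pv_mem_rob]
  refine and_congr_right fun _ => ?_
  rw [pv_mem_foldl_iff _ (fun ab q => pvPairP gs ab q)
      (by
        intro s ab q
        dsimp only
        rw [List.mem_append, pv_mem_harmonic]
        exact Iff.rfl)]
  simp

theorem pv_mem_A (grid : List (String × List (Int × Int))) (gs : Int × Int) (q : Int × Int) :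
    q ∈ get_harmonic_antinodes grid gs ↔ pvInb gs q = true ∧ pvE grid gs q := by
  simp only [get_harmonic_antinodes]
  rw [pv_mem_rob]
  refine and_congr_right fun hinb => ?_
  rw [pv_mem_foldl_iff _ (fun key q =>
        ¬(key = "." ∨ key = "#") ∧ 1 < ((PySem.Dict.ofList grid : PySem.Dict String (List (Int × Int))).getD key []).length ∧
          q ∈ get_antinodes_for_frequency (PySem.Dict.ofList grid) gs key)
      (by
        intro s key q
        dsimp only
        split_ifs with h1 h2
        · exact ⟨fun h => Or.inl h, fun h => h.elim id (fun e => absurd h1 e.1)⟩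
        · rw [PySem.Set.mem_union, PySem.Set.mem_union]
          constructor
          · rintro (hs | hs | hg)
            · exact Or.inl hs
            · exact Or.inl hs
            · exact Or.inr ⟨h1, h2, hg⟩
          · rintro (hs | ⟨_, _, hg⟩)
            · exact Or.inl hs
            · exact Or.inr (Or.inr hg)
        · constructor
          · exact Or.inl
          · rintro (hs | ⟨_, hlen, _⟩)
            · exact hs
            · exact absurd hlen h2)]
  simp only [PySem.Set.empty, List.not_mem_nil, false_or]
  unfold pvE
  constructor
  · rintro ⟨key, hk, hns, hlen, hmem⟩
    rw [pv_mem_freq] at hmem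
    exact ⟨key, hk, hns, hlen, hmem.2⟩
  · rintro ⟨key, hk, hns, hlen, hab⟩
    refine ⟨key, hk, hns, hlen, ?_⟩
    rw [pv_mem_freq]
    exact ⟨hinb, hab⟩

-- B'S SIDE ------------------------------------------------------------

theorem pv_seg_iff (p1 : Int × Int) (sx sy W H i : Int) :
    ((pvAxis p1.2 sy H (pvAxis p1.1 sx W (-W) (W - 1)).1 (pvAxis p1.1 sx W (-W) (W - 1)).2).1 ≤ i ∧
      i ≤ (pvAxis p1.2 sy H (pvAxis p1.1 sx W (-W) (W - 1)).1 (pvAxis p1.1 sx W (-W) (W - 1)).2).2) ↔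
    (-W ≤ i ∧ i < W ∧ 0 ≤ p1.1 + i * sx ∧ p1.1 + i * sx < W ∧ 0 ≤ p1.2 + i * sy ∧ p1.2 + i * sy < H) := by
  constructor
  · intro h
    have h2 := (pv_axis_mem p1.2 sy H _ _ i).mp h
    have h1 := (pv_axis_mem p1.1 sx W (-W) (W - 1) i).mp ⟨h2.1, h2.2.1⟩
    have hw : i < W := by omega
    exact ⟨h1.1, hw, h1.2.2.1, h1.2.2.2, h2.2.2.1, h2.2.2.2⟩
  · rintro ⟨hm, hw, hx1, hx2, hy1, hy2⟩
    have hw' : i ≤ W - 1 := by omega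
    have h1 := (pv_axis_mem p1.1 sx W (-W) (W - 1) i).mpr ⟨hm, hw', hx1, hx2⟩
    exact (pv_axis_mem p1.2 sy H _ _ i).mpr ⟨h1.1, h1.2, hy1, hy2⟩

theorem pv_pairB_iff (gs : Int × Int) (ab : (Int × Int) × (Int × Int)) (q : Int × Int) :
    (∃ b ∈ PySem.List.pyRange
        (pvAxis (pvMin ab.1 ab.2).2 (pvStepOf (pvMin ab.1 ab.2) (pvMax ab.1 ab.2)).2 gs.2
          (pvAxis (pvMin ab.1 ab.2).1 (pvStepOf (pvMin ab.1 ab.2) (pvMax ab.1 ab.2)).1 gs.1 (-gs.1) (gs.1 - 1)).1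
          (pvAxis (pvMin ab.1 ab.2).1 (pvStepOf (pvMin ab.1 ab.2) (pvMax ab.1 ab.2)).1 gs.1 (-gs.1) (gs.1 - 1)).2).1
        ((pvAxis (pvMin ab.1 ab.2).2 (pvStepOf (pvMin ab.1 ab.2) (pvMax ab.1 ab.2)).2 gs.2
          (pvAxis (pvMin ab.1 ab.2).1 (pvStepOf (pvMin ab.1 ab.2) (pvMax ab.1 ab.2)).1 gs.1 (-gs.1) (gs.1 - 1)).1
          (pvAxis (pvMin ab.1 ab.2).1 (pvStepOf (pvMin ab.1 ab.2) (pvMax ab.1 ab.2)).1 gs.1 (-gs.1) (gs.1 - 1)).2).2 + 1),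
      q = ((pvMin ab.1 ab.2).1 + b * (pvStepOf (pvMin ab.1 ab.2) (pvMax ab.1 ab.2)).1,
           (pvMin ab.1 ab.2).2 + b * (pvStepOf (pvMin ab.1 ab.2) (pvMax ab.1 ab.2)).2)) ↔
    pvPairP gs ab q := by
  unfold pvPairP
  constructor
  · rintro ⟨i, hi, he⟩
    rw [PySem.List.mem_pyRange_one] at hi
    have hseg := (pv_seg_iff (pvMin ab.1 ab.2) (pvStepOf (pvMin ab.1 ab.2) (pvMax ab.1 ab.2)).1
      (pvStepOf (pvMin ab.1 ab.2) (pvMax ab.1 ab.2)).2 gs.1 gs.2 i).mp ⟨hi.1, by omega⟩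
    exact ⟨i, hseg.1, hseg.2.1, hseg.2.2.1, hseg.2.2.2.1, hseg.2.2.2.2.1, hseg.2.2.2.2.2, he⟩
  · rintro ⟨i, h1, h2, h3, h4, h5, h6, he⟩
    have hseg := (pv_seg_iff (pvMin ab.1 ab.2) (pvStepOf (pvMin ab.1 ab.2) (pvMax ab.1 ab.2)).1
      (pvStepOf (pvMin ab.1 ab.2) (pvMax ab.1 ab.2)).2 gs.1 gs.2 i).mpr ⟨h1, h2, h3, h4, h5, h6⟩
    refine ⟨i, ?_, he⟩
    rw [PySem.List.mem_pyRange_one]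
    omega

theorem pv_mem_B (grid : List (String × List (Int × Int))) (gs : Int × Int) (q : Int × Int) :
    q ∈ get_harmonic_antinodes_alt grid gs ↔ pvE grid gs q := by
  simp only [get_harmonic_antinodes_alt]
  rw [(PySem.List.sorted2_perm _ _ _ _).mem_iff]
  rw [pv_mem_foldl_iff _ (fun kv q =>
        ¬(kv.1 = "." ∨ kv.1 = "#" ∨ kv.2.length ≤ 1) ∧ ∃ ab ∈ pvCombos kv.2, pvPairP gs ab q)
      (by
        intro s kv q
        dsimp only
        split_ifs with h1
        · exact ⟨Or.inl, fun h => h.elim id (fun e => absurd h1 e.1)⟩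
        · rw [pv_mem_foldl_iff _ (fun ab q => pvPairP gs ab q)
            (by
              intro s ab q
              dsimp only
              rw [pv_p2_eq]
              rw [PySem.Set.mem_foldl_add]
              exact or_congr_right (pv_pairB_iff gs ab q))]
          exact ⟨fun h => h.elim Or.inl (fun e => Or.inr ⟨h1, e⟩),
                 fun h => h.elim Or.inl (fun e => Or.inr e.2)⟩)]
  unfold pvE
  simp only [PySem.Set.empty, List.not_mem_nil, false_or]
  have hnd : (PySem.Dict.ofList grid : PySem.Dict String (List (Int × Int))).keys.Nodup :=
    PySem.Dict.nodup_keys_ofList grid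
  rw [PySem.Dict.items_eq_map_keys _ hnd []]
  constructor
  · rintro ⟨kv, hkv, hns, hab⟩
    rw [List.mem_map] at hkv
    obtain ⟨key, hk, rfl⟩ := hkv
    dsimp only at hns hab
    refine ⟨key, hk, fun h => hns (h.elim Or.inl (Or.inr ∘ Or.inl)), ?_, hab⟩
    by_contra hle
    exact hns (Or.inr (Or.inr (by omega)))
  · rintro ⟨key, hk, hns, hlen, hab⟩
    refine ⟨(key, (PySem.Dict.ofList grid : PySem.Dict String (List (Int × Int))).getD key []), ?_, ?_, hab⟩
    · exact List.mem_map.mpr ⟨key, hk, rfl⟩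
    · dsimp only
      rintro (h | h | h)
      · exact hns (Or.inl h)
      · exact hns (Or.inr h)
      · omega

-- every point either program collects is in bounds
theorem pv_E_inb (grid : List (String × List (Int × Int))) (gs : Int × Int) (q : Int × Int)
    (h : pvE grid gs q) : pvInb gs q = true := by
  obtain ⟨key, _, _, _, ab, _, i, h1, h2, h3, h4, h5, h6, he⟩ := h
  subst he
  unfold pvInb
  simp only [Bool.and_eq_true, decide_eq_true_eq]
  exact ⟨⟨⟨h3, h4⟩, h5⟩, h6⟩

-- NODUP AND SORTEDNESS ------------------------------------------------

theorem pv_B_nodup (grid : List (String × List (Int × Int))) (gs : Int × Int) :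
    (get_harmonic_antinodes_alt grid gs).Nodup := by
  simp only [get_harmonic_antinodes_alt]
  refine (PySem.List.sorted2_perm _ _ _ _).nodup_iff.mpr ?_
  refine pv_nodup_foldl _ (fun s kv hs => ?_) _ _ List.nodup_nil
  dsimp only
  split_ifs with h
  · exact hs
  · exact pv_nodup_foldl _ (fun s ab hs => pv_nodup_foldl _
      (fun s i hs => PySem.Set.nodup_add _ _ hs) _ _ hs) _ _ hs

-- the insertion-sort comparator used by sorted2 on pairs of ints
def pvBefore (a b : Int × Int) : Bool :=
  decide (a.1 < b.1) || (!decide (b.1 < a.1) && decide (a.2 < b.2))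

def pvLe (a b : Int × Int) : Prop := pvBefore b a = false

theorem pv_before_iff (a b : Int × Int) :
    pvBefore a b = true ↔ (a.1 < b.1 ∨ (¬ b.1 < a.1 ∧ a.2 < b.2)) := by
  simp [pvBefore]

theorem pv_le_iff (a b : Int × Int) :
    pvLe a b ↔ ¬(b.1 < a.1 ∨ (¬ a.1 < b.1 ∧ b.2 < a.2)) := by
  rw [pvLe, Bool.eq_false_iff, Ne, pv_before_iff]

theorem pv_before_asymm (a b : Int × Int) (h : pvBefore a b = true) : pvLe a b := by
  rw [pv_before_iff] at h
  rw [pv_le_iff]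
  omega

theorem pv_before_le_trans (a b c : Int × Int) (h1 : pvBefore a b = true) (h2 : pvLe b c) :
    pvLe a c := by
  rw [pv_before_iff] at h1
  rw [pv_le_iff] at h2 ⊢
  omega

theorem pv_not_before_le (a b : Int × Int) (h : ¬ pvBefore a b = true) : pvLe b a :=
  Bool.eq_false_iff.mpr h

theorem pv_le_antisymm (a b : Int × Int) (h1 : pvLe a b) (h2 : pvLe b a) : a = b := by
  rw [pv_le_iff] at h1 h2
  rcases a with ⟨a1, a2⟩; rcases b with ⟨b1, b2⟩
  dsimp only at h1 h2
  simp only [Prod.mk.injEq]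
  constructor <;> omega

theorem pv_insertBy_pairwise (x : Int × Int) :
    ∀ ys : List (Int × Int), ys.Pairwise pvLe → (PySem.List.insertBy pvBefore x ys).Pairwise pvLe := by
  intro ys
  induction ys with
  | nil => intro _; simp [PySem.List.insertBy]
  | cons y t ih =>
    intro h
    rw [List.pairwise_cons] at h
    show (if pvBefore x y = true then x :: y :: t else y :: PySem.List.insertBy pvBefore x t).Pairwise pvLe
    split_ifs with hb
    · refine List.Pairwise.cons ?_ (List.pairwise_cons.mpr h)
      intro z hz
      rcases List.mem_cons.mp hz with rfl | hz
      · exact pv_before_asymm x z hb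
      · exact pv_before_le_trans x y z hb (h.1 z hz)
    · refine List.Pairwise.cons ?_ (ih h.2)
      intro z hz
      rw [PySem.List.mem_insertBy] at hz
      rcases hz with rfl | hz
      · exact pv_not_before_le z y hb
      · exact h.1 z hz

theorem pv_sorted2_pairwise (l : List (Int × Int)) :
    (PySem.List.sorted2 l (fun e => e.1) (fun e => e.2) false).Pairwise pvLe := by
  show (List.foldl (fun acc x => PySem.List.insertBy pvBefore x acc) [] l).Pairwise pvLe
  have h : ∀ (l : List (Int × Int)) (acc : List (Int × Int)), acc.Pairwise pvLe →
      (List.foldl (fun acc x => PySem.List.insertBy pvBefore x acc) acc l).Pairwise pvLe := by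
    intro l
    induction l with
    | nil => intro acc h; simpa using h
    | cons x t ih => intro acc h; exact ih _ (pv_insertBy_pairwise x acc h)
  exact h l [] List.Pairwise.nil

-- ===== VERDICT (by name: the statement is the Claim_ definition above) =====
theorem get_harmonic_antinodes_spec : Claim_equal_get_harmonic_antinodes := by
  unfold Claim_equal_get_harmonic_antinodes
  intro grid gs _ _
  unfold Spec_get_harmonic_antinodes
  -- both sides are Nodup lists sorted by the same lexicographic comparator with the
  -- same members (pvE), hence equal
  have hA : ∀ q, q ∈ get_harmonic_antinodes grid gs ↔ pvE grid gs q := fun q =>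
    (pv_mem_A grid gs q).trans ⟨fun h => h.2, fun h => ⟨pv_E_inb grid gs q h, h⟩⟩
  have hAnd : (get_harmonic_antinodes grid gs).Nodup := by
    simp only [get_harmonic_antinodes]
    unfold remove_out_of_bounds
    exact (PySem.List.sorted2_perm _ _ _ _).nodup_iff.mpr (PySem.Set.nodup_ofList _)
  have hperm : (get_harmonic_antinodes grid gs).Perm (get_harmonic_antinodes_alt grid gs) :=
    (List.perm_ext_iff_of_nodup hAnd (pv_B_nodup grid gs)).mpr
      (fun q => (hA q).trans (pv_mem_B grid gs q).symm)
  have hpA : (get_harmonic_antinodes grid gs).Pairwise pvLe := by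
    simp only [get_harmonic_antinodes]
    unfold remove_out_of_bounds
    exact pv_sorted2_pairwise _
  have hpB : (get_harmonic_antinodes_alt grid gs).Pairwise pvLe := by
    simp only [get_harmonic_antinodes_alt]
    exact pv_sorted2_pairwise _
  exact List.Perm.eq_of_pairwise (fun a b _ _ h1 h2 => pv_le_antisymm a b h1 h2) hpA hpB hperm
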